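-- pv_equiv track=rewrite | github.com/kennethortega-myt/scePr24 | sce-models-api/sce-models-api-develop/models/cortesmodel/acta_base.py | obtener_extremos_por_fila
-- ===== SOURCE A (Python) =====
-- def obtener_extremos_por_fila(puntos, tolerancia_y=5):
--     if not puntos or len(puntos) < 4:
--         raise ValueError(f"[EXTREMOS] Puntos insuficientes o vacíos: {puntos}")
--
--     puntos_validos = [
--         (x, y)
--         for p in puntos
--         if isinstance(p, (tuple, list))
--         and len(p) == 2
--         and isinstance((x := p[0]), int)
--         and isinstance((y := p[1]), int)
--         and x >= 0
--         and y >= 0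
--     ]
--
--     if len(puntos_validos) < 4:
--         raise ValueError("[EXTREMOS] Coordenadas inválidas o ruidosas detectadas.")
--
--     puntos_ordenados = sorted(puntos_validos, key=lambda p: (p[1], p[0]))
--
--     filas = []
--     fila_actual = [puntos_ordenados[0]]
--
--     for punto in puntos_ordenados[1:]:
--         if abs(punto[1] - fila_actual[-1][1]) <= tolerancia_y:
--             fila_actual.append(punto)
--         else:
--             filas.append(fila_actual)
--             fila_actual = [punto]
--
--     filas.append(fila_actual)
--
--     filas_ordenadas = [sorted(fila, key=lambda p: p[0]) for fila in filas]
--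
--     primera_fila = filas_ordenadas[0]
--     ultima_fila = filas_ordenadas[-1]
--
--     return [
--         primera_fila[0],
--         primera_fila[-1],
--         ultima_fila[0],
--         ultima_fila[-1],
--     ]
-- ===== SOURCE B (Python) =====
-- def _primer_segmento(pts, tolerancia_y):
--     seg = [pts[0]]
--     for p in pts[1:]:
--         if abs(p[1] - seg[-1][1]) > tolerancia_y:
--             break
--         seg.append(p)
--     return seg
--
--
-- def obtener_extremos_por_fila(puntos, tolerancia_y=5):
--     if not puntos or len(puntos) < 4:
--         raise ValueError(f"[EXTREMOS] Puntos insuficientes o vacíos: {puntos}")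
--
--     puntos_validos = [
--         (x, y)
--         for p in puntos
--         if isinstance(p, (tuple, list))
--         and len(p) == 2
--         and isinstance((x := p[0]), int)
--         and isinstance((y := p[1]), int)
--         and x >= 0
--         and y >= 0
--     ]
--
--     if len(puntos_validos) < 4:
--         raise ValueError("[EXTREMOS] Coordenadas inválidas o ruidosas detectadas.")
--
--     puntos_ordenados = sorted(puntos_validos, key=lambda p: (p[1], p[0]))
--
--     # only the two segments that matter: forward scan for the first row,
--     # the same scan on the reversed list for the last row
--     primera = sorted(_primer_segmento(puntos_ordenados, tolerancia_y),
--                      key=lambda p: p[0])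
--     ultima = sorted(_primer_segmento(puntos_ordenados[::-1], tolerancia_y)[::-1],
--                     key=lambda p: p[0])
--
--     return [primera[0], primera[-1], ultima[0], ultima[-1]]
-- ===== Notes on version B (the rewrite author's own statement) =====
-- stated objective: alternative
-- what changed: Instead of partitioning the whole sorted list into rows and sorting every row, B computes only the first row (forward gap scan) and the last row (the same scan on the reversed list) and sorts just those two segments by x.
import Mathlib
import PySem

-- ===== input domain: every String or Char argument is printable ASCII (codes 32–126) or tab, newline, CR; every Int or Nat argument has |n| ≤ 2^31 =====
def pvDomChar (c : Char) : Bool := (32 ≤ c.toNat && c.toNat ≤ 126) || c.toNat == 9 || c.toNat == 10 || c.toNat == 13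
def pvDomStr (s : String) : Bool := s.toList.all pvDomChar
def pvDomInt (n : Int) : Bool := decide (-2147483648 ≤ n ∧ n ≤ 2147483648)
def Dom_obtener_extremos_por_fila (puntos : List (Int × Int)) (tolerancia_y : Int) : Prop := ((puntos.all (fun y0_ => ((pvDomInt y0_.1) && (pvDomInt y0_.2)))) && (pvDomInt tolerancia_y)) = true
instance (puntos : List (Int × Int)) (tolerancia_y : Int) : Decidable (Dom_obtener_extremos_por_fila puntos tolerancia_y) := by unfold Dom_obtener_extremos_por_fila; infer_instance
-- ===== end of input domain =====

-- B computes only the first and last row (forward gap scan, and the same scan on the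
-- reversed list) instead of partitioning and sorting every row; same return value.

-- ===== PORT A =====
-- the row-grouping loop of A: filas / fila_actual accumulators, fila_actual always nonempty
def pvGrpA (tol : Int) : List (Int × Int) → List (List (Int × Int)) → List (Int × Int) → List (List (Int × Int))
  | [], filas, cur => filas ++ [cur]
  | p :: rest, filas, cur =>
      if |p.2 - (cur.getLastD (0, 0)).2| ≤ tol then pvGrpA tol rest filas (cur ++ [p])
      else pvGrpA tol rest (filas ++ [cur]) [p]

def obtener_extremos_por_fila (puntos : List (Int × Int)) (tolerancia_y : Int) : List (Int × Int) :=
  -- the two ValueError raises of A are excluded by Pre_; elements are typed (Int × Int),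
  -- so the isinstance/len checks of the comprehension reduce to the sign checks
  let puntos_validos := puntos.filter (fun p => decide (0 ≤ p.1) && decide (0 ≤ p.2))
  let puntos_ordenados := PySem.List.sorted2 puntos_validos (fun p => p.2) (fun p => p.1)
  match puntos_ordenados with
  | [] => []   -- unreachable under Pre_ (Python raised before reaching puntos_ordenados[0])
  | q :: qs =>
    let filas := pvGrpA tolerancia_y qs [] [q]
    let filas_ordenadas := filas.map (fun f => PySem.List.sorted f (fun p => p.1) false)
    let primera_fila := filas_ordenadas.headD []
    let ultima_fila := filas_ordenadas.getLastD []
    [primera_fila.headD (0, 0), primera_fila.getLastD (0, 0),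
     ultima_fila.headD (0, 0), ultima_fila.getLastD (0, 0)]

-- ===== PORT B =====
-- the for-loop of _primer_segmento after seeding seg = [pts[0]]
def pvSegGo (tol : Int) : Int × Int → List (Int × Int) → List (Int × Int)
  | _, [] => []
  | prev, p :: r => if |p.2 - prev.2| > tol then [] else p :: pvSegGo tol p r

def pvPrimerSegmento (tol : Int) : List (Int × Int) → List (Int × Int)
  | [] => []        -- unreachable under Pre_ (pts[0] would raise)
  | h :: t => h :: pvSegGo tol h t

def obtener_extremos_por_fila_alt (puntos : List (Int × Int)) (tolerancia_y : Int) : List (Int × Int) :=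
  let puntos_validos := puntos.filter (fun p => decide (0 ≤ p.1) && decide (0 ≤ p.2))
  let puntos_ordenados := PySem.List.sorted2 puntos_validos (fun p => p.2) (fun p => p.1)
  let primera := PySem.List.sorted (pvPrimerSegmento tolerancia_y puntos_ordenados) (fun p => p.1) false
  let ultima := PySem.List.sorted ((pvPrimerSegmento tolerancia_y puntos_ordenados.reverse).reverse) (fun p => p.1) false
  [primera.headD (0, 0), primera.getLastD (0, 0), ultima.headD (0, 0), ultima.getLastD (0, 0)]

-- ===== PRECONDITION & SPEC =====
-- A raises ValueError when fewer than 4 points are given or fewer than 4 are valid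
-- (nonnegative coordinates); exactly those inputs are excluded.
def Pre_obtener_extremos_por_fila (puntos : List (Int × Int)) (tolerancia_y : Int) : Prop :=
  4 ≤ puntos.length ∧ 4 ≤ (puntos.filter (fun p => decide (0 ≤ p.1) && decide (0 ≤ p.2))).length
instance (puntos : List (Int × Int)) (tolerancia_y : Int) : Decidable (Pre_obtener_extremos_por_fila puntos tolerancia_y) := by unfold Pre_obtener_extremos_por_fila; infer_instance

def pvWitness_obtener_extremos_por_fila : (List (Int × Int)) × Int := ([(0, 0), (5, 1), (0, 9), (6, 10)], 3)

def Spec_obtener_extremos_por_fila (puntos : List (Int × Int)) (tolerancia_y : Int) (out : List (Int × Int)) : Prop := out = obtener_extremos_por_fila_alt puntos tolerancia_y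
instance (puntos : List (Int × Int)) (tolerancia_y : Int) (out : List (Int × Int)) : Decidable (Spec_obtener_extremos_por_fila puntos tolerancia_y out) := by unfold Spec_obtener_extremos_por_fila; infer_instance

-- ===== CLAIM (what is proved, stated in full; the proofs are below) =====
def Claim_equal_obtener_extremos_por_fila : Prop := ∀ (puntos : List (Int × Int)) (tolerancia_y : Int), Dom_obtener_extremos_por_fila puntos tolerancia_y → Pre_obtener_extremos_por_fila puntos tolerancia_y → Spec_obtener_extremos_por_fila puntos tolerancia_y (obtener_extremos_por_fila puntos tolerancia_y)

-- ===== LEMMAS AND PROOFS =====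

theorem pvGrpA_acc (tol : Int) (rest : List (Int × Int)) (filas : List (List (Int × Int))) (cur : List (Int × Int)) :
    pvGrpA tol rest filas cur = filas ++ pvGrpA tol rest [] cur := by
  induction rest generalizing filas cur with
  | nil => simp [pvGrpA]
  | cons p r ih =>
      simp only [pvGrpA]
      split
      · exact ih filas (cur ++ [p])
      · rw [ih (filas ++ [cur]) [p], ih ([] ++ [cur]) [p]]; simp

theorem pvGrpA_ne_nil (tol : Int) (rest : List (Int × Int)) (filas : List (List (Int × Int))) (cur : List (Int × Int)) :
    pvGrpA tol rest filas cur ≠ [] := by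
  induction rest generalizing filas cur with
  | nil => simp [pvGrpA]
  | cons p r ih => simp only [pvGrpA]; split <;> apply ih

theorem pvGrpA_head (tol : Int) (rest : List (Int × Int)) (cur : List (Int × Int)) (h : cur ≠ []) :
    (pvGrpA tol rest [] cur).headD [] = cur ++ pvSegGo tol (cur.getLastD (0, 0)) rest := by
  induction rest generalizing cur with
  | nil => simp [pvGrpA, pvSegGo]
  | cons p r ih =>
      simp only [pvGrpA, pvSegGo]
      by_cases hg : |p.2 - (cur.getLastD (0, 0)).2| ≤ tol
      · rw [if_pos hg, if_neg (not_lt.mpr hg), ih (cur ++ [p]) (by simp)]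
        simp
      · rw [if_neg hg, if_pos (not_le.mp hg), pvGrpA_acc]
        cases cur with
        | nil => exact absurd rfl h
        | cons a l => simp

theorem pvLastD_cons (a : Int × Int) (l : List (Int × Int)) (d : Int × Int) :
    (a :: l).getLast?.getD d = l.getLast?.getD a := by
  cases l with
  | nil => simp
  | cons b t =>
      rw [List.getLast?_cons_cons]
      cases hlt : (b :: t).getLast? with
      | none => simp [List.getLast?_eq_none_iff] at hlt
      | some v => simp

-- scanning a concatenation: the scan of X, then into Y only if all of X was consumed
theorem pvSegGo_append (tol : Int) (X : List (Int × Int)) (prev : Int × Int) (Y : List (Int × Int)) :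
    pvSegGo tol prev (X ++ Y) =
      pvSegGo tol prev X ++ (if pvSegGo tol prev X = X then pvSegGo tol (X.getLastD prev) Y else []) := by
  induction X generalizing prev with
  | nil => simp [pvSegGo]
  | cons x X' ih =>
      simp only [List.cons_append, pvSegGo]
      by_cases hg : |x.2 - prev.2| > tol
      · simp [if_pos hg]
      · simp only [if_neg hg, ih x]
        by_cases hf : pvSegGo tol x X' = X'
        · simp only [hf, List.cons_append, List.cons.injEq, true_and, ite_true]
          rw [List.getLastD_eq_getLast?, List.getLastD_eq_getLast?, pvLastD_cons]
        · have hne : x :: pvSegGo tol x X' ≠ x :: X' := by simpa using hf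
          simp [hf, hne]

-- a big gap right after segment R stops the reversed scan at R
theorem pvPrimer_cut (tol : Int) (R C : List (Int × Int)) (hR : R ≠ [])
    (hgap : pvSegGo tol (R.getLastD (0, 0)) C = []) :
    pvPrimerSegmento tol (R ++ C) = pvPrimerSegmento tol R := by
  cases R with
  | nil => exact absurd rfl hR
  | cons h R' =>
      simp only [List.cons_append, pvPrimerSegmento]
      rw [pvSegGo_append]
      by_cases hf : pvSegGo tol h R' = R'
      · rw [if_pos hf]
        have : (R'.getLastD h) = ((h :: R').getLastD (0, 0)) := by
          cases R' with
          | nil => simp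
          | cons b t => simp [List.getLastD]
        rw [this, hgap]
        simp
      · rw [if_neg hf]; simp

theorem pvGrpA_last (tol : Int) (rest : List (Int × Int)) (filas : List (List (Int × Int))) (cur : List (Int × Int))
    (h : cur ≠ []) (hfull : pvPrimerSegmento tol cur.reverse = cur.reverse) :
    (pvGrpA tol rest filas cur).getLastD [] = (pvPrimerSegmento tol (cur ++ rest).reverse).reverse := by
  induction rest generalizing filas cur with
  | nil =>
      simp only [pvGrpA, List.append_nil, hfull, List.reverse_reverse]
      simp
  | cons p r ih =>
      simp only [pvGrpA]
      by_cases hg : |p.2 - (cur.getLastD (0, 0)).2| ≤ tol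
      · rw [if_pos hg, ih filas (cur ++ [p]) (by simp)]
        · rw [List.append_assoc]; rfl
        · -- the extended fila is still fully consumed by the reversed scan
          rw [List.reverse_append]
          simp only [List.reverse_singleton, List.singleton_append, pvPrimerSegmento]
          have hlast : cur.reverse = cur.getLastD (0, 0) :: cur.dropLast.reverse := by
            cases hcur : cur.reverse with
            | nil => simp at hcur; exact absurd hcur h
            | cons a l =>
                have h1 : cur = (a :: l).reverse := by rw [← hcur]; simp
                rw [h1]; simp
          rw [hlast]
          simp only [pvSegGo]
          rw [if_neg (by rw [abs_sub_comm]; exact not_lt.mpr hg)]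
          have hfull' := hfull
          rw [hlast] at hfull'
          simp only [pvPrimerSegmento, List.cons.injEq] at hfull'
          rw [hfull'.2]
      · rw [if_neg hg, ih (filas ++ [cur]) [p] (by simp)
            (by simp [pvPrimerSegmento, pvSegGo])]
        have hgap : pvSegGo tol (((p :: r).reverse).getLastD (0, 0)) cur.reverse = [] := by
          have hlastR : ((p :: r).reverse).getLastD (0, 0) = p := by simp
          rw [hlastR]
          cases hcur : cur.reverse with
          | nil => simp [pvSegGo]
          | cons a l =>
              have ha : a = cur.getLastD (0, 0) := by
                have h1 : cur = (a :: l).reverse := by rw [← hcur]; simp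
                rw [h1]; simp
              simp only [pvSegGo]
              rw [if_pos (by rw [ha, abs_sub_comm]; exact not_le.mp hg)]
        have h1 : (cur ++ p :: r).reverse = (p :: r).reverse ++ cur.reverse := by simp
        rw [h1, pvPrimer_cut tol ((p :: r).reverse) cur.reverse (by simp) hgap]
        rfl

theorem headD_map (f : List (Int × Int) → List (Int × Int)) (l : List (List (Int × Int))) (h : l ≠ []) :
    (l.map f).headD [] = f (l.headD []) := by cases l with | nil => exact absurd rfl h | cons a t => simp

theorem getLastD_map (f : List (Int × Int) → List (Int × Int)) (l : List (List (Int × Int))) (h : l ≠ []) :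
    (l.map f).getLastD [] = f (l.getLastD []) := by
  induction l with
  | nil => exact absurd rfl h
  | cons a t ih =>
      cases t with
      | nil => simp
      | cons b t' => simpa using ih (by simp)

-- ===== VERDICT (by name: the statement is the Claim_ definition above) =====
theorem obtener_extremos_por_fila_spec : Claim_equal_obtener_extremos_por_fila := by
  intro puntos tol _ hpre
  simp only [Spec_obtener_extremos_por_fila, obtener_extremos_por_fila, obtener_extremos_por_fila_alt]
  obtain ⟨-, h4⟩ := hpre
  cases hord : PySem.List.sorted2 (puntos.filter (fun p => decide (0 ≤ p.1) && decide (0 ≤ p.2))) (fun p => p.2) (fun p => p.1) with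
  | nil =>
      exfalso
      have hlen := (PySem.List.sorted2_perm (puntos.filter (fun p => decide (0 ≤ p.1) && decide (0 ≤ p.2))) (fun p => p.2) (fun p => p.1) false).length_eq
      rw [hord] at hlen
      simp at hlen
      omega
  | cons q qs =>
      dsimp only
      have hne := pvGrpA_ne_nil tol qs ([] : List (List (Int × Int))) [q]
      rw [headD_map _ _ hne, getLastD_map _ _ hne,
          pvGrpA_head tol qs [q] (by simp),
          pvGrpA_last tol qs [] [q] (by simp) (by simp [pvPrimerSegmento, pvSegGo])]
      simp [pvPrimerSegmento]
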